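-- pv_equiv track=rewrite | github.com/cloughurd/advent-of-code | 2023/day14.py | part1
-- ===== SOURCE A (Python) =====
-- from collections import defaultdict
-- from typing import Dict, List, Tuple
--
-- def part1(lines: List[str]) -> int:
--     columns = [Column() for x in range(len(lines[0]))]
--     for row, line in enumerate(lines):
--         for col, character in enumerate(line):
--             if character == '#':
--                 columns[col].add_cube(row)
--             if character == 'O':
--                 columns[col].add_rock()
--     weights = [c.calc_weight(len(lines)) for c in columns]
--     return sum(weights)
--
-- class Column:
--     def __init__(self) -> None:
--         self.last_cube: int = -1
--         self.buildups: Dict[int, int] = defaultdict(lambda: 0)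
--
--     def add_cube(self, i: int):
--         self.last_cube = i
--
--     def add_rock(self):
--         self.buildups[self.last_cube] += 1
--
--     def calc_weight(self, length: int) -> int:
--         weight = 0
--         for cube in self.buildups:
--             for r in range(self.buildups[cube]):
--                 weight += length - cube - r - 1
--         return weight
-- ===== SOURCE B (Python) =====
-- def part1(lines):
--     n = len(lines)
--     next_free = [0] * len(lines[0])
--     total = 0
--     for row, line in enumerate(lines):
--         for col, ch in enumerate(line):
--             if ch == '#':
--                 next_free[col] = row + 1
--             elif ch == 'O':
--                 total += n - next_free[col]
--                 next_free[col] += 1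
--     return total
-- ===== Notes on version B (the rewrite author's own statement) =====
-- stated objective: simpler
-- what changed: Replaced the Column class, per-column defaultdict of build-ups and the separate calc_weight phase by a single pass that keeps one next-free-row counter per column and a running total.
import Mathlib
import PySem

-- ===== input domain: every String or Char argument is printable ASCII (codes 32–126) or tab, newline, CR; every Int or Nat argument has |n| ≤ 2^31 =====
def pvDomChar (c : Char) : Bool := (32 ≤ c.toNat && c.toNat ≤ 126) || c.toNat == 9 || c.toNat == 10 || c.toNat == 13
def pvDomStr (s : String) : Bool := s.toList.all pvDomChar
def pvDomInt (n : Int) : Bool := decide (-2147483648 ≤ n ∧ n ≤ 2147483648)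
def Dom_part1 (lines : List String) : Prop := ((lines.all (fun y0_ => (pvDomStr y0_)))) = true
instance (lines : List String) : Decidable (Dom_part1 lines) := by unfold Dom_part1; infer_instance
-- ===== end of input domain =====

-- B replaces A's Column objects (per-column defaultdict of build-ups plus a second weighing
-- phase) by one pass keeping a next-free-row counter per column and a running total: simpler.

-- ===== PORT A =====
-- Column object: (last_cube, buildups)
def part1Step (row : Nat) (cs : List (Int × PySem.Dict Int Int)) (p : Char × Nat) :
    List (Int × PySem.Dict Int Int) :=
  let cs1 := if p.1 = '#' then cs.modify p.2 (fun c => ((row : Int), c.2)) else cs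
  if p.1 = 'O' then
    cs1.modify p.2 (fun c => (c.1, c.2.insert c.1 (c.2.getD c.1 0 + 1)))
  else cs1

-- Column.calc_weight: iterate the dict's keys, then range(count), accumulating into `weight`
def part1CalcWeight (len : Int) (d : PySem.Dict Int Int) : Int :=
  d.keys.foldl (fun w cube =>
    (PySem.List.pyRange 0 (d.getD cube 0) 1).foldl (fun w2 r => w2 + (len - cube - r - 1)) w) 0

def part1 (lines : List String) : Int :=
  let columns : List (Int × PySem.Dict Int Int) :=
    (List.range (lines.headD "").length).map (fun _ => (-1, PySem.Dict.empty))
  let columns := lines.zipIdx.foldl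
    (fun cs rl => rl.1.toList.zipIdx.foldl (part1Step rl.2) cs) columns
  (columns.map (fun c => part1CalcWeight (lines.length : Int) c.2)).sum

-- ===== PORT B =====
def part1AltStep (n : Int) (row : Nat) (st : List Int × Int) (p : Char × Nat) :
    List Int × Int :=
  if p.1 = '#' then (st.1.modify p.2 (fun _ => (row : Int) + 1), st.2)
  else if p.1 = 'O' then (st.1.modify p.2 (· + 1), st.2 + (n - st.1.getD p.2 0))
  else st

def part1_alt (lines : List String) : Int :=
  let n : Int := lines.length
  let st : List Int × Int := (List.replicate (lines.headD "").length 0, 0)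
  let st := lines.zipIdx.foldl
    (fun st rl => rl.1.toList.zipIdx.foldl (part1AltStep n rl.2) st) st
  st.2

-- ===== PRECONDITION & SPEC =====
-- Pre_ excludes exactly the inputs on which A raises: the empty grid (lines[0] is an
-- IndexError) and grids where a '#' or 'O' occurs in a line at a column index ≥ len(lines[0])
-- (columns[col] is an IndexError there); B raises on exactly the same inputs.
def Pre_part1 (lines : List String) : Prop :=
  lines ≠ [] ∧ (lines.all (fun line =>
    (line.toList.drop (lines.headD "").length).all (fun ch => ch ≠ '#' && ch ≠ 'O'))) = true
instance (lines : List String) : Decidable (Pre_part1 lines) := by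
  unfold Pre_part1; infer_instance
def pvWitness_part1 : List String := ["O.#", "#O.", ".OO"]

def Spec_part1 (lines : List String) (out : Int) : Prop := out = part1_alt lines
instance (lines : List String) (out : Int) : Decidable (Spec_part1 lines out) := by
  unfold Spec_part1; infer_instance

-- ===== CLAIM (what is proved, stated in full; the proofs are below) =====
def Claim_equal_part1 : Prop :=
  ∀ (lines : List String), Dom_part1 lines → Pre_part1 lines → Spec_part1 lines (part1 lines)

-- ===== LEMMAS AND PROOFS =====

-- weight contributed by one dict entry (cube row k, rock count v)
def pvInnerW (n k v : Int) : Int :=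
  (PySem.List.pyRange 0 v 1).foldl (fun w r => w + (n - k - r - 1)) 0

-- the invariant tying A's per-column state to B's next_free/total state, at row r,
-- with the first c columns possibly already touched in row r
def pvInv (n : Int) (r c : Nat) (cols : List (Int × PySem.Dict Int Int))
    (st : List Int × Int) : Prop :=
  st.1.length = cols.length ∧
  st.2 = (cols.map (fun p => part1CalcWeight n p.2)).sum ∧
  ∀ i (h : i < cols.length),
    st.1.getD i 0 = (cols[i]).1 + 1 + (cols[i]).2.getD (cols[i]).1 0 ∧
    (cols[i]).2.keys.Nodup ∧
    (∀ p ∈ (cols[i]).2.items, p.1 ≤ (cols[i]).1 ∧ 0 ≤ p.2) ∧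
    (cols[i]).1 ≤ (r : Int) ∧ (c ≤ i → (cols[i]).1 < (r : Int))

lemma pvFoldl_eq_sum_map {α : Type} (f : Int → α → Int) (g : α → Int)
    (hf : ∀ w x, f w x = w + g x) : ∀ (l : List α) (a : Int),
    l.foldl f a = a + (l.map g).sum := by
  intro l
  induction l with
  | nil => simp
  | cons x xs ih => intro a; simp [List.foldl_cons, hf, ih]; ring

lemma pvInnerW_succ (n k v : Int) (hv : 0 ≤ v) :
    pvInnerW n k (v + 1) = pvInnerW n k v + (n - k - v - 1) := by
  unfold pvInnerW
  rw [PySem.List.pyRange_one_succ_right hv, List.foldl_append]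
  simp

lemma pvCalcWeight_eq_sum (n : Int) (d : PySem.Dict Int Int) (hd : d.keys.Nodup) :
    part1CalcWeight n d = (d.items.map (fun p => pvInnerW n p.1 p.2)).sum := by
  unfold part1CalcWeight
  rw [pvFoldl_eq_sum_map _ (fun cube => pvInnerW n cube (d.getD cube 0))
    (by intro w cube; dsimp only; rw [PySem.List.foldl_add]; unfold pvInnerW
        rw [PySem.List.foldl_add]; ring)]
  have hkeys : d.keys = d.items.map (fun p => p.1) := rfl
  rw [hkeys, List.map_map, zero_add]
  congr 1
  apply List.map_congr_left
  intro p hp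
  have : d.getD p.1 0 = p.2 :=
    PySem.Dict.getD_of_mem_items d (by simpa using hp) hd 0
  simp [Function.comp, this]

lemma pvSum_map_modify {α : Type} (g : α → Int) (f : α → α) :
    ∀ (l : List α) (i : Nat) (hi : i < l.length),
    ((l.modify i f).map g).sum = (l.map g).sum + (g (f l[i]) - g l[i]) := by
  intro l
  induction l with
  | nil => intro i hi; simp at hi
  | cons x xs ih =>
    intro i hi
    cases i with
    | zero => simp [List.modify]; ring
    | succ j =>
      have hj : j < xs.length := by simpa using hi
      simp [List.modify_succ_cons, List.map_cons, List.sum_cons, ih j hj]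
      ring

lemma pvSum_map_replace (g : Int × Int → Int) (k newv : Int) :
    ∀ (l : List (Int × Int)), (l.map (fun p => p.1)).Nodup → ∀ v, (k, v) ∈ l →
    ((l.map (fun p => if p.1 == k then (k, newv) else p)).map g).sum
      = (l.map g).sum + (g (k, newv) - g (k, v)) := by
  intro l
  induction l with
  | nil => intro _ v hv; simp at hv
  | cons q rest ih =>
    intro hnd v hv
    have hnd1 : q.1 ∉ rest.map (fun p => p.1) := by
      simpa using (List.nodup_cons.mp hnd).1
    have hnd2 : (rest.map (fun p => p.1)).Nodup := (List.nodup_cons.mp hnd).2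
    rcases List.mem_cons.mp hv with hq | hq
    · have hrest : rest.map (fun p => if p.1 == k then (k, newv) else p) = rest := by
        conv_rhs => rw [← List.map_id rest]
        apply List.map_congr_left
        intro p hp
        have hpk : p.1 ≠ k := by
          intro hpe
          exact hnd1 (by rw [← hq]; exact List.mem_map.mpr ⟨p, hp, by simp [hpe]⟩)
        simp [hpk]
      subst hq
      simp only [List.map_cons, List.sum_cons, hrest, beq_self_eq_true, if_true]
      ring
    · have hk : q.1 ≠ k := by
        intro hpe
        exact hnd1 (by rw [hpe]; exact List.mem_map.mpr ⟨(k, v), hq, rfl⟩)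
      have hk' : (q.1 == k) = false := by simpa using hk
      simp only [List.map_cons, List.sum_cons, hk', Bool.false_eq_true, if_false,
        ih hnd2 v hq]
      ring

lemma pvGetD_nonneg (d : PySem.Dict Int Int) (k : Int)
    (hv : ∀ p ∈ d.items, 0 ≤ p.2) : 0 ≤ d.getD k 0 := by
  rw [PySem.Dict.getD_eq_get?_getD]
  cases hg : d.get? k with
  | none => simp
  | some v =>
    have := hv _ (PySem.Dict.mem_items_of_get?_eq_some d hg)
    simpa using this

lemma pvInnerW_zero (n k : Int) : pvInnerW n k 0 = 0 := by
  simp [pvInnerW, PySem.List.pyRange]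

lemma pvSum_insert (n : Int) (d : PySem.Dict Int Int) (k : Int) (hd : d.keys.Nodup)
    (hv : ∀ p ∈ d.items, 0 ≤ p.2) :
    ((d.insert k (d.getD k 0 + 1)).items.map (fun p => pvInnerW n p.1 p.2)).sum
      = (d.items.map (fun p => pvInnerW n p.1 p.2)).sum + (n - k - d.getD k 0 - 1) := by
  by_cases hc : d.contains k
  · obtain ⟨v, hg⟩ : ∃ v, d.get? k = some v := by
      have := PySem.Dict.contains_eq_isSome_get? (d := d) (k := k)
      rw [hc] at this
      exact Option.isSome_iff_exists.mp this.symm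
    have hmem : (k, v) ∈ d.items := PySem.Dict.mem_items_of_get?_eq_some _ hg
    have hgd : d.getD k 0 = v := PySem.Dict.getD_of_get?_eq_some d 0 hg
    have hv0 : 0 ≤ v := by simpa using hv _ hmem
    rw [PySem.Dict.items_insert_of_contains d _ hc, hgd,
      pvSum_map_replace _ _ _ _ hd v hmem, pvInnerW_succ n k v hv0]
    ring
  · have hcf : d.contains k = false := by simpa using hc
    rw [PySem.Dict.items_insert_of_not_contains d _ hcf,
      PySem.Dict.getD_of_not_contains d 0 hcf]
    have h1 : pvInnerW n k 1 = n - k - 1 := by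
      have := pvInnerW_succ n k 0 le_rfl
      rw [pvInnerW_zero] at this
      simpa using this
    simp [h1]

lemma pvInv_mono (n : Int) (r c c' : Nat) (cols : List (Int × PySem.Dict Int Int))
    (st : List Int × Int) (hcc : c ≤ c') (h : pvInv n r c cols st) :
    pvInv n r c' cols st := by
  obtain ⟨h1, h2, h3⟩ := h
  exact ⟨h1, h2, fun i hi => ⟨(h3 i hi).1, (h3 i hi).2.1, (h3 i hi).2.2.1,
    (h3 i hi).2.2.2.1, fun hci => (h3 i hi).2.2.2.2 (le_trans hcc hci)⟩⟩

lemma pvInv_next_row (n : Int) (r c : Nat) (cols : List (Int × PySem.Dict Int Int))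
    (st : List Int × Int) (h : pvInv n r c cols st) : pvInv n (r + 1) 0 cols st := by
  obtain ⟨h1, h2, h3⟩ := h
  refine ⟨h1, h2, fun i hi => ⟨(h3 i hi).1, (h3 i hi).2.1, (h3 i hi).2.2.1, ?_, ?_⟩⟩
  · have := (h3 i hi).2.2.2.1; push_cast; omega
  · intro _; have := (h3 i hi).2.2.2.1; push_cast; omega

lemma pvNotContains (d : PySem.Dict Int Int) (lc k : Int)
    (hk : ∀ p ∈ d.items, p.1 ≤ lc ∧ 0 ≤ p.2) (hlt : lc < k) : d.contains k = false := by
  have hnm : k ∉ d.keys := by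
    intro hm
    have hkeys : d.keys = d.items.map (fun p => p.1) := rfl
    rw [hkeys] at hm
    obtain ⟨p, hp, hpe⟩ := List.mem_map.mp hm
    have := (hk p hp).1
    omega
  have := mt (PySem.Dict.contains_iff_mem_keys d k).mp hnm
  simpa using this

lemma pvStep_inv (n : Int) (r c : Nat) (ch : Char) (cols : List (Int × PySem.Dict Int Int))
    (st : List Int × Int) (hinv : pvInv n r c cols st)
    (hc : c < cols.length ∨ (ch ≠ '#' ∧ ch ≠ 'O')) :
    pvInv n r (c + 1) (part1Step r cols (ch, c)) (part1AltStep n r st (ch, c)) := by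
  obtain ⟨hlen, htot, hidx⟩ := hinv
  by_cases hH : ch = '#'
  · -- a cube: A records last_cube := row, B sets next_free := row + 1
    subst hH
    have hclen : c < cols.length := by
      rcases hc with h | h
      · exact h
      · exact absurd rfl h.1
    have hclen' : c < st.1.length := by omega
    obtain ⟨h1, h2, h3, h4, h5⟩ := hidx c hclen
    have hlc : (cols[c]).1 < (r : Int) := h5 le_rfl
    have eA : part1Step r cols ('#', c)
        = cols.modify c (fun col => ((r : Int), col.2)) := by
      simp [part1Step]
    have eB : part1AltStep n r st ('#', c)
        = (st.1.modify c (fun _ => (r : Int) + 1), st.2) := by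
      simp [part1AltStep]
    rw [eA, eB]
    refine ⟨by simp [List.length_modify, hlen], ?_, ?_⟩
    · rw [pvSum_map_modify _ _ cols c hclen]
      simpa using htot
    · intro i hi
      have hi' : i < cols.length := by simpa [List.length_modify] using hi
      have hi1 : i < st.1.length := by omega
      have hgetE : (st.1.modify c (fun _ => (r : Int) + 1)).getD i 0
          = if c = i then (r : Int) + 1 else st.1[i] := by
        rw [List.getD_eq_getElem _ _ (by simpa [List.length_modify] using hi1),
          List.getElem_modify]
      obtain ⟨g1, g2, g3, g4, g5⟩ := hidx i hi'
      rw [List.getD_eq_getElem _ _ hi1] at g1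
      by_cases hci : c = i
      · subst hci
        have hcont : (cols[c]).2.contains (r : Int) = false :=
          pvNotContains _ _ _ h3 hlc
        refine ⟨?_, ?_, ?_, by simp, fun hcc => absurd hcc (by omega)⟩
        · rw [hgetE]; simp only [reduceIte]
          simp [PySem.Dict.getD_of_not_contains _ _ hcont]
        · simpa [List.getElem_modify] using g2
        · intro p hp
          simp only [List.getElem_modify, reduceIte] at hp ⊢
          have := g3 p hp
          constructor
          · have := this.1; omega
          · exact this.2
      · refine ⟨?_, ?_, ?_, by simpa [List.getElem_modify, hci] using g4,
          fun hcc => by simpa [List.getElem_modify, hci] using g5 (by omega)⟩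
        · rw [hgetE, if_neg hci]
          simpa [List.getElem_modify, hci, List.getD_eq_getElem _ _ hi1] using g1
        · simpa [List.getElem_modify, hci] using g2
        · intro p hp
          simp only [List.getElem_modify, if_neg hci] at hp ⊢
          exact g3 p hp
  · by_cases hO : ch = 'O'
    · -- a rock: A bumps buildups[last_cube], B adds n - next_free and bumps next_free
      subst hO
      have hclen : c < cols.length := by
        rcases hc with h | h
        · exact h
        · exact absurd rfl h.2
      have hclen' : c < st.1.length := by omega
      obtain ⟨h1, h2, h3, h4, h5⟩ := hidx c hclen
      have hv0 : 0 ≤ (cols[c]).2.getD (cols[c]).1 0 :=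
        pvGetD_nonneg _ _ (fun p hp => (h3 p hp).2)
      have eA : part1Step r cols ('O', c)
          = cols.modify c (fun col => (col.1, col.2.insert col.1 (col.2.getD col.1 0 + 1))) := by
        simp [part1Step]
      have eB : part1AltStep n r st ('O', c)
          = (st.1.modify c (· + 1), st.2 + (n - st.1.getD c 0)) := by
        simp [part1AltStep]
      rw [eA, eB]
      have hcw : part1CalcWeight n ((cols[c]).2.insert (cols[c]).1 ((cols[c]).2.getD (cols[c]).1 0 + 1))
          = part1CalcWeight n (cols[c]).2
            + (n - (cols[c]).1 - (cols[c]).2.getD (cols[c]).1 0 - 1) := by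
        rw [pvCalcWeight_eq_sum _ _ (PySem.Dict.nodup_keys_insert _ _ _ h2),
          pvCalcWeight_eq_sum _ _ h2]
        exact pvSum_insert n (cols[c]).2 (cols[c]).1 h2 (fun p hp => (h3 p hp).2)
      refine ⟨by simp [List.length_modify, hlen], ?_, ?_⟩
      · rw [pvSum_map_modify _ _ cols c hclen]
        simp only [hcw]
        rw [htot, h1]
        ring
      · intro i hi
        have hi' : i < cols.length := by simpa [List.length_modify] using hi
        have hi1 : i < st.1.length := by omega
        have hgetE : (st.1.modify c (· + 1)).getD i 0
            = if c = i then st.1[c] + 1 else st.1[i] := by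
          rw [List.getD_eq_getElem _ _ (by simpa [List.length_modify] using hi1),
            List.getElem_modify]
          by_cases hci : c = i
          · subst hci; simp
          · simp [hci]
        obtain ⟨g1, g2, g3, g4, g5⟩ := hidx i hi'
        rw [List.getD_eq_getElem _ _ hi1] at g1
        by_cases hci : c = i
        · subst hci
          have h1' : st.1[c] = (cols[c]).1 + 1 + (cols[c]).2.getD (cols[c]).1 0 := by
            rw [← List.getD_eq_getElem _ _ hclen']; exact h1
          refine ⟨?_, ?_, ?_, ?_, fun hcc => absurd hcc (by omega)⟩
          · rw [hgetE]; simp only [reduceIte]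
            simp only [List.getElem_modify, reduceIte]
            rw [PySem.Dict.getD_insert_self]
            rw [h1']; ring
          · simp only [List.getElem_modify, reduceIte]
            exact PySem.Dict.nodup_keys_insert _ _ _ g2
          · intro p hp
            simp only [List.getElem_modify, reduceIte] at hp ⊢
            rcases (PySem.Dict.mem_items_insert _ _ _ p).mp hp with he | ⟨hm, _⟩
            · subst he
              exact ⟨le_refl _, by omega⟩
            · exact g3 p hm
          · simpa [List.getElem_modify] using g4
        · refine ⟨?_, ?_, ?_, ?_, fun hcc => ?_⟩
          · rw [hgetE, if_neg hci]
            simpa [List.getElem_modify, hci, List.getD_eq_getElem _ _ hi1] using g1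
          · simpa [List.getElem_modify, hci] using g2
          · intro p hp
            simp only [List.getElem_modify, if_neg hci] at hp ⊢
            exact g3 p hp
          · simpa [List.getElem_modify, hci] using g4
          · simpa [List.getElem_modify, hci] using g5 (by omega)
    · -- any other character: both sides are unchanged
      have eA : part1Step r cols (ch, c) = cols := by
        simp [part1Step, hH, hO]
      have eB : part1AltStep n r st (ch, c) = st := by
        simp [part1AltStep, hH, hO]
      rw [eA, eB]
      exact pvInv_mono n r c (c + 1) cols st (by omega) ⟨hlen, htot, hidx⟩

lemma pvStep_length (r : Nat) (cs : List (Int × PySem.Dict Int Int)) (p : Char × Nat) :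
    (part1Step r cs p).length = cs.length := by
  unfold part1Step; split_ifs <;> simp

lemma pvFold_length (r : Nat) : ∀ (l : List (Char × Nat))
    (cs : List (Int × PySem.Dict Int Int)),
    (l.foldl (part1Step r) cs).length = cs.length := by
  intro l
  induction l with
  | nil => simp
  | cons x xs ih => intro cs; simp [List.foldl_cons, ih, pvStep_length]

lemma pvInner_inv (n : Int) (r : Nat) : ∀ (l : List Char) (c : Nat)
    (cols : List (Int × PySem.Dict Int Int)) (st : List Int × Int),
    pvInv n r c cols st →
    (∀ j (hj : j < l.length), cols.length ≤ c + j → (l[j] ≠ '#' ∧ l[j] ≠ 'O')) →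
    pvInv n r (c + l.length) ((l.zipIdx c).foldl (part1Step r) cols)
      ((l.zipIdx c).foldl (part1AltStep n r) st) := by
  intro l
  induction l with
  | nil => intro c cols st h _; simpa using h
  | cons ch rest ih =>
    intro c cols st h hcond
    rw [List.zipIdx_cons]
    simp only [List.foldl_cons]
    have hc : c < cols.length ∨ (ch ≠ '#' ∧ ch ≠ 'O') := by
      by_cases hlt : c < cols.length
      · exact Or.inl hlt
      · exact Or.inr (hcond 0 (by simp) (by omega))
    have hstep := pvStep_inv n r c ch cols st h hc
    have hlen2 : (part1Step r cols (ch, c)).length = cols.length :=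
      pvStep_length r cols (ch, c)
    have hcond' : ∀ j (hj : j < rest.length),
        (part1Step r cols (ch, c)).length ≤ (c + 1) + j →
        (rest[j] ≠ '#' ∧ rest[j] ≠ 'O') := by
      intro j hj hge
      have := hcond (j + 1) (by simpa using Nat.succ_lt_succ hj)
        (by rw [hlen2] at hge; omega)
      simpa using this
    have hres := ih (c + 1) _ _ hstep hcond'
    have harith : c + (ch :: rest).length = (c + 1) + rest.length := by
      simp [List.length_cons]; omega
    rw [harith]
    exact hres

lemma pvOuter_inv (n : Int) : ∀ (ls : List String) (r : Nat)
    (cols : List (Int × PySem.Dict Int Int)) (st : List Int × Int),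
    pvInv n r 0 cols st →
    (∀ line ∈ ls, ∀ ch ∈ line.toList.drop cols.length, ch ≠ '#' ∧ ch ≠ 'O') →
    pvInv n (r + ls.length) 0
      ((ls.zipIdx r).foldl (fun cs rl => rl.1.toList.zipIdx.foldl (part1Step rl.2) cs) cols)
      ((ls.zipIdx r).foldl (fun st rl => rl.1.toList.zipIdx.foldl (part1AltStep n rl.2) st) st) := by
  intro ls
  induction ls with
  | nil => intro r cols st h _; simpa using h
  | cons line rest ih =>
    intro r cols st h hcond
    rw [List.zipIdx_cons]
    simp only [List.foldl_cons]
    have hcond0 : ∀ j (hj : j < line.toList.length), cols.length ≤ 0 + j →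
        (line.toList[j] ≠ '#' ∧ line.toList[j] ≠ 'O') := by
      intro j hj hge
      apply hcond line List.mem_cons_self
      rw [List.mem_iff_getElem]
      refine ⟨j - cols.length, by simp only [List.length_drop]; omega, ?_⟩
      rw [List.getElem_drop]
      congr 1
      omega
    have h1 := pvInner_inv n r line.toList 0 cols st h hcond0
    have h2 := pvInv_next_row n r _ _ _ h1
    have hlenf : ((line.toList.zipIdx).foldl (part1Step r) cols).length = cols.length :=
      pvFold_length r _ cols
    have hcond2 : ∀ line' ∈ rest,
        ∀ ch ∈ line'.toList.drop ((line.toList.zipIdx).foldl (part1Step r) cols).length,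
        ch ≠ '#' ∧ ch ≠ 'O' := by
      rw [hlenf]
      intro line' hm
      exact hcond line' (List.mem_cons_of_mem _ hm)
    have hres := ih (r + 1) _ _ h2 hcond2
    have harith : r + (line :: rest).length = (r + 1) + rest.length := by
      simp [List.length_cons]; omega
    rw [harith]
    exact hres

-- ===== VERDICT (by name: the statement is the Claim_ definition above) =====
theorem part1_spec : Claim_equal_part1 := by
  intro lines hdom hpre
  unfold Spec_part1 part1 part1_alt
  have hcw0 : part1CalcWeight (lines.length : Int) PySem.Dict.empty = 0 := rfl
  have hinit : pvInv (lines.length : Int) 0 0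
      ((List.range (lines.headD "").length).map (fun _ => (-1, PySem.Dict.empty)))
      (List.replicate (lines.headD "").length 0, 0) := by
    refine ⟨by simp, by simp [hcw0], ?_⟩
    intro i hi
    have hi' : i < (lines.headD "").length := by simpa using hi
    have hgc : ((List.range (lines.headD "").length).map
        (fun _ => ((-1 : Int), (PySem.Dict.empty : PySem.Dict Int Int))))[i] =
        (-1, PySem.Dict.empty) := by simp
    have hgr : (List.replicate (lines.headD "").length (0 : Int)).getD i 0 = 0 := by
      rw [List.getD_eq_getElem _ _ (by simpa using hi')]; simp
    have hek : (PySem.Dict.empty : PySem.Dict Int Int).keys = [] := rfl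
    have hei : (PySem.Dict.empty : PySem.Dict Int Int).items = [] := rfl
    refine ⟨?_, ?_, ?_, ?_, ?_⟩
    · rw [hgr, hgc]; simp [PySem.Dict.getD_empty]
    · rw [hgc]; simp [hek]
    · rw [hgc]; intro p hp; rw [hei] at hp; simp at hp
    · rw [hgc]; simp
    · intro _; rw [hgc]; simp
  have hcond : ∀ line ∈ lines,
      ∀ ch ∈ line.toList.drop
        ((List.range (lines.headD "").length).map (fun _ =>
          ((-1 : Int), (PySem.Dict.empty : PySem.Dict Int Int)))).length,
      ch ≠ '#' ∧ ch ≠ 'O' := by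
    have hpre2 := hpre.2
    simp only [List.all_eq_true, Bool.and_eq_true, decide_eq_true_eq] at hpre2
    simpa using hpre2
  have hfin := pvOuter_inv (lines.length : Int) lines 0 _ _ hinit hcond
  obtain ⟨hlenF, htotF, _⟩ := hfin
  simpa using htotF.symm
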